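-- pv_equiv track=rewrite | github.com/ChingPingWang/TC_FEM | pre_processing/crop_image.py | img_crop_position_list
-- ===== SOURCE A (Python) =====
-- def img_crop_position_list(scale_x,scale_y,crop_len,stride):
-- 	pos_list = []
-- 	for num_x in range(0,scale_x,stride):
-- 		for num_y in range(0,scale_y,stride):
-- 			len_x = num_x + crop_len
-- 			len_y = num_y + crop_len
-- 			##----Position x----##
-- 			if len_x > scale_x:
-- 				x1 = scale_x - crop_len
-- 			else:
-- 				x1 = num_x
-- 			##----Position y----##
-- 			if len_y > scale_y:
-- 				y1 = scale_y - crop_len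
-- 			else:
-- 				y1 = num_y
-- 			each_pos = [x1,y1]
-- 			pos_list.append(each_pos)
-- 	return pos_list
-- ===== SOURCE B (Python) =====
-- def img_crop_position_list(scale_x, scale_y, crop_len, stride):
--     # Single flat pass: count grid cells per axis once, then decode each flat
--     # index k with divmod and clamp arithmetically with min.
--     nx = len(range(0, scale_x, stride))
--     ny = len(range(0, scale_y, stride))
--     pos_list = []
--     for k in range(nx * ny):
--         i, j = divmod(k, ny)
--         pos_list.append([min(i * stride, scale_x - crop_len),
--                          min(j * stride, scale_y - crop_len)])
--     return pos_list
-- ===== Notes on version B (the rewrite author's own statement) =====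
-- stated objective: alternative
-- what changed: B replaces A's nested row/column loops with per-cell if-clamps by a single flat loop over one index k in range(nx*ny): the axis cell counts are taken from len(range(...)), each k is decoded into grid coordinates with divmod, and the clamp is the arithmetic min(i*stride, scale-crop_len) instead of a branch.
import Mathlib
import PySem

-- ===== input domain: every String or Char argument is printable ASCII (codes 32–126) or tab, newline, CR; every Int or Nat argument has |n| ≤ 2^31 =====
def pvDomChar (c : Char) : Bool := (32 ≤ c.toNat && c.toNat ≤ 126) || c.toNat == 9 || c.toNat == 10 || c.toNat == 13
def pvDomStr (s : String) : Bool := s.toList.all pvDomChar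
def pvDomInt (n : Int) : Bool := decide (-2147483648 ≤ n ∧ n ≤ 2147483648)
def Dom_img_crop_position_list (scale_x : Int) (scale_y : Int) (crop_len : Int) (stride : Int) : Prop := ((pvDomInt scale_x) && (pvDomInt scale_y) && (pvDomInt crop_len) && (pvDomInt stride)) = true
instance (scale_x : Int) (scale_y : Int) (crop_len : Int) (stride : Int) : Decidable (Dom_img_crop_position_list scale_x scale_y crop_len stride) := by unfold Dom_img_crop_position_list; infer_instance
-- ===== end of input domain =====

-- B replaces A's nested loops with per-cell branch clamps by one flat loop over
-- k in range(nx*ny) with divmod index decoding and an arithmetic min clamp ("alternative").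

-- ===== PORT A =====
def img_crop_position_list (scale_x : Int) (scale_y : Int) (crop_len : Int) (stride : Int) : List (List Int) :=
  (PySem.List.pyRange 0 scale_x stride).foldl (fun pos_list num_x =>
    (PySem.List.pyRange 0 scale_y stride).foldl (fun pl num_y =>
      let len_x := num_x + crop_len
      let len_y := num_y + crop_len
      let x1 := if len_x > scale_x then scale_x - crop_len else num_x
      let y1 := if len_y > scale_y then scale_y - crop_len else num_y
      pl ++ [[x1, y1]]) pos_list) []

-- ===== PORT B =====
-- B: axis cell counts nx, ny from len(range(...)), one flat loop over k in range(nx*ny),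
-- divmod decoding (ported as the total floordiv/mod pair; ny ≠ 0 whenever the loop body runs),
-- min clamp.
def img_crop_position_list_alt (scale_x : Int) (scale_y : Int) (crop_len : Int) (stride : Int) : List (List Int) :=
  let nx : Int := ((PySem.List.pyRange 0 scale_x stride).length : Int)
  let ny : Int := ((PySem.List.pyRange 0 scale_y stride).length : Int)
  (PySem.List.pyRange 0 (nx * ny) 1).foldl (fun pos_list k =>
    let i := PySem.Int.floordiv k ny
    let j := PySem.Int.mod k ny
    pos_list ++ [[min (i * stride) (scale_x - crop_len), min (j * stride) (scale_y - crop_len)]]) []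

-- ===== PRECONDITION & SPEC =====
-- Pre_ excludes stride == 0, on which Python's range raises ValueError in both A and B.
def Pre_img_crop_position_list (scale_x : Int) (scale_y : Int) (crop_len : Int) (stride : Int) : Prop := stride ≠ 0
instance (scale_x : Int) (scale_y : Int) (crop_len : Int) (stride : Int) : Decidable (Pre_img_crop_position_list scale_x scale_y crop_len stride) := by unfold Pre_img_crop_position_list; infer_instance
def pvWitness_img_crop_position_list : Int × Int × Int × Int := (6, 4, 3, 2)
def Spec_img_crop_position_list (scale_x : Int) (scale_y : Int) (crop_len : Int) (stride : Int) (out : List (List Int)) : Prop := out = img_crop_position_list_alt scale_x scale_y crop_len stride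
instance (scale_x : Int) (scale_y : Int) (crop_len : Int) (stride : Int) (out : List (List Int)) : Decidable (Spec_img_crop_position_list scale_x scale_y crop_len stride out) := by unfold Spec_img_crop_position_list; infer_instance

-- ===== CLAIM =====
def Claim_equal_img_crop_position_list : Prop := ∀ (scale_x : Int) (scale_y : Int) (crop_len : Int) (stride : Int), Dom_img_crop_position_list scale_x scale_y crop_len stride → Pre_img_crop_position_list scale_x scale_y crop_len stride → Spec_img_crop_position_list scale_x scale_y crop_len stride (img_crop_position_list scale_x scale_y crop_len stride)

-- ===== LEMMAS AND PROOFS =====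

-- The element count of pyRange, mirroring its definition.
def pvCount (a b s : Int) : Nat :=
  if s = 0 then 0
  else if 0 < s then (if a < b then ((b - a + s - 1) / s).toNat else 0)
  else (if b < a then ((a - b + -s - 1) / -s).toNat else 0)

-- pyRange is a linear map over List.range of its count.
theorem pvPyRange_struct (a b s : Int) :
    PySem.List.pyRange a b s = (List.range (pvCount a b s)).map (fun k : Nat => a + s * (k : Int)) := by
  unfold PySem.List.pyRange pvCount
  split_ifs <;> rfl

theorem pvLen (a b s : Int) : (PySem.List.pyRange a b s).length = pvCount a b s := by
  rw [pvPyRange_struct]; simp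

theorem pvPyRange_zero_struct (b s : Int) :
    PySem.List.pyRange 0 b s = (List.range (pvCount 0 b s)).map (fun k : Nat => s * (k : Int)) := by
  rw [pvPyRange_struct]; simp only [zero_add]

-- A's nested append-folds as a flatMap of per-row maps, with the branch clamp read as min.
theorem pvA_eq (sx sy cl st : Int) :
    img_crop_position_list sx sy cl st
      = (PySem.List.pyRange 0 sx st).flatMap (fun x =>
          (PySem.List.pyRange 0 sy st).map (fun y => [min x (sx - cl), min y (sy - cl)])) := by
  unfold img_crop_position_list
  have e1 : ∀ (x lim : Int), (if x + cl > lim then lim - cl else x) = min x (lim - cl) := by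
    intro x lim; split_ifs <;> omega
  simp only [e1, PySem.List.foldl_append_singleton_eq_map]
  rw [PySem.List.foldl_append_eq_flatMap, List.nil_append]

-- Row-major flattening of a product of ranges equals one flat range with divmod decoding.
theorem pvFlatIndex {γ : Type} (m n : Nat) (F : Nat → Nat → γ) :
    (List.range m).flatMap (fun i => (List.range n).map (fun j => F i j))
      = (List.range (m * n)).map (fun k => F (k / n) (k % n)) := by
  induction m with
  | zero => simp
  | succ m ih =>
    rcases Nat.eq_zero_or_pos n with h0 | hn
    · subst h0; simp
    · rw [List.range_succ, Nat.succ_mul, List.range_add, List.flatMap_append, ih,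
        List.map_append, List.map_map]
      simp only [List.flatMap_singleton]
      congr 1
      apply List.map_congr_left
      intro j hj
      have hjn : j < n := List.mem_range.mp hj
      have hdiv : (m * n + j) / n = m := by
        rw [Nat.mul_comm m n, Nat.add_comm, Nat.add_mul_div_left _ _ hn, Nat.div_eq_of_lt hjn,
          Nat.zero_add]
      have hmod : (m * n + j) % n = j := by
        rw [Nat.mul_comm m n, Nat.add_comm, Nat.add_mul_mod_self_left, Nat.mod_eq_of_lt hjn]
      simp [Function.comp, hdiv, hmod]

-- A's clamped product over the two coordinate ranges, in flat-index form.
theorem pvAside (sx sy cl st : Int) (m n : Nat) :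
    ((List.range m).map (fun k : Nat => st * (k : Int))).flatMap (fun x =>
        ((List.range n).map (fun k : Nat => st * (k : Int))).map (fun y =>
          [min x (sx - cl), min y (sy - cl)]))
      = (List.range (m * n)).map (fun k : Nat =>
          [min (st * ((k / n : Nat) : Int)) (sx - cl), min (st * ((k % n : Nat) : Int)) (sy - cl)]) := by
  rw [List.flatMap_map]
  simp only [Function.comp_def, List.map_map]
  exact pvFlatIndex m n (fun i j => [min (st * (i : Int)) (sx - cl), min (st * (j : Int)) (sy - cl)])

theorem pvMain (sx sy cl st : Int) :
    img_crop_position_list sx sy cl st = img_crop_position_list_alt sx sy cl st := by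
  rw [pvA_eq, pvPyRange_zero_struct sx st, pvPyRange_zero_struct sy st, pvAside]
  unfold img_crop_position_list_alt
  show _ = (PySem.List.pyRange 0 (((PySem.List.pyRange 0 sx st).length : Int) * ((PySem.List.pyRange 0 sy st).length : Int)) 1).foldl
      (fun pos_list k => pos_list ++
        [[min (PySem.Int.floordiv k ((PySem.List.pyRange 0 sy st).length : Int) * st) (sx - cl),
          min (PySem.Int.mod k ((PySem.List.pyRange 0 sy st).length : Int) * st) (sy - cl)]]) []
  rw [pvLen 0 sx st, pvLen 0 sy st]
  rw [show ((pvCount 0 sx st : Int) * (pvCount 0 sy st : Int)) = ((pvCount 0 sx st * pvCount 0 sy st : Nat) : Int) by push_cast; ring]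
  rw [PySem.List.pyRange_zero_nat (pvCount 0 sx st * pvCount 0 sy st),
      PySem.List.foldl_append_singleton_eq_map, List.nil_append, List.map_map]
  apply List.map_congr_left
  intro k _
  simp only [Function.comp_def, PySem.Int.floordiv_natCast, PySem.Int.mod_natCast]
  simp [mul_comm]

-- ===== VERDICT =====
theorem img_crop_position_list_spec : Claim_equal_img_crop_position_list := by
  intro sx sy cl st _ _
  exact pvMain sx sy cl st
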